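-- pv_equiv track=rewrite | github.com/pombredanne/DependencyGrapher | gus/chart/DependencyGrapher.py | __slice_label__
-- ===== SOURCE A (Python) =====
-- def __slice_label__(label):
--     label = str(label).replace(":", " ")
--     words = label.split(' ')
--     out = []
--     max_length = 8
--     count = 0
--     for word in words:
--         out.append(word)
--         count = count + 1
--         if count >= max_length:
--             out.append("\n")
--             count = 0
--     return " ".join(out)
-- ===== SOURCE B (Python) =====
-- def __slice_label__(label):
--     words = str(label).replace(":", " ").split(' ')
--     out = []
--     for i in range(0, len(words), 8):
--         chunk = words[i:i + 8]
--         out.extend(chunk)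
--         if len(chunk) == 8:
--             out.append("\n")
--     return " ".join(out)
-- ===== Notes on version B (the rewrite author's own statement) =====
-- stated objective: alternative
-- what changed: B replaces A's word-by-word loop with a resetting counter by a loop over fixed-size chunks words[i:i+8] (range with step 8), extending the output per chunk and appending the newline token exactly when the chunk is full.
import Mathlib
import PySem

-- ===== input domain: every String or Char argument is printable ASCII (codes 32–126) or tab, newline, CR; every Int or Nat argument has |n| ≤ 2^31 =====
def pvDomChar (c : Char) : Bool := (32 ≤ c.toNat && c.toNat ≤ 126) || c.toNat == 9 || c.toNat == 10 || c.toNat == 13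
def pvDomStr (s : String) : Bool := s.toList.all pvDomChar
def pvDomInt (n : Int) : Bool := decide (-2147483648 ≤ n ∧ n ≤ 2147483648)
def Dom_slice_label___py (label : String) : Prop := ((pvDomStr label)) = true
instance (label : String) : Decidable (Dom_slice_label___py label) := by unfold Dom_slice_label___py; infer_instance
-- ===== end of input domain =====

-- B replaces A's word-by-word loop with a resetting counter by a loop over fixed-size
-- chunks words[i:i+8] (range with step 8); same return value, no speed claim.

-- ===== PORT A =====
def slice_label___py (label : String) : String :=
  let label := PySem.Str.replace label ":" " "
  let words := (PySem.Str.split? label " ").getD []   -- sep " " ≠ "", so split? is always some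
  let max_length : Int := 8
  let st := words.foldl (fun (st : List String × Int) word =>
      let out := st.1 ++ [word]
      let count := st.2 + 1
      if count ≥ max_length then (out ++ ["\n"], (0 : Int)) else (out, count))
    (([] : List String), (0 : Int))
  PySem.Str.join " " st.1

-- ===== PORT B =====
def slice_label___py_alt (label : String) : String :=
  let words := (PySem.Str.split? (PySem.Str.replace label ":" " ") " ").getD []
  let out := (PySem.List.pyRange 0 (words.length : Int) 8).foldl
      (fun out i =>
        let chunk := PySem.List.slice words (some i) (some (i + 8))
        (out ++ chunk) ++ (if (chunk.length : Int) = 8 then ["\n"] else []))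
      ([] : List String)
  PySem.Str.join " " out

-- ===== PRECONDITION & SPEC =====
def Spec_slice_label___py (label : String) (out : String) : Prop := out = slice_label___py_alt label
instance (label : String) (out : String) : Decidable (Spec_slice_label___py label out) := by unfold Spec_slice_label___py; infer_instance

-- ===== CLAIM (what is proved, stated in full; the proofs are below) =====
def Claim_equal_slice_label___py : Prop := ∀ (label : String), Dom_slice_label___py label → Spec_slice_label___py label (slice_label___py label)

-- ===== LEMMAS AND PROOFS =====

-- The common value of both loops: words grouped into blocks of 8, a "\n" token after
-- each full block; `r` = words still missing to complete the current block.
def chunksFrom : Nat → List String → List String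
  | 0, ws => "\n" :: chunksFrom 8 ws
  | _ + 1, [] => []
  | r + 1, w :: ws => w :: chunksFrom r ws
termination_by r ws => ws.length * 2 + (if r = 0 then 1 else 0)
decreasing_by
  · simp
  · simp only [List.length_cons]; split <;> omega

lemma chunksFrom_zero (ws : List String) : chunksFrom 0 ws = "\n" :: chunksFrom 8 ws := by
  rw [chunksFrom]

lemma chunksFrom_nil (r : Nat) : chunksFrom (r + 1) [] = [] := by
  rw [chunksFrom]

lemma chunksFrom_cons (r : Nat) (w : String) (ws : List String) :
    chunksFrom (r + 1) (w :: ws) = w :: chunksFrom r ws := by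
  rw [chunksFrom]

lemma foldA_eq (ws : List String) : ∀ (r : Nat) (out : List String), 1 ≤ r → r ≤ 8 →
    (ws.foldl (fun (st : List String × Int) word =>
        if 8 ≤ st.2 + 1 then (st.1 ++ [word] ++ ["\n"], (0 : Int)) else (st.1 ++ [word], st.2 + 1))
      (out, (8 : Int) - r)).1 = out ++ chunksFrom r ws := by
  induction ws with
  | nil =>
    intro r out h1 h8
    obtain ⟨r', rfl⟩ : ∃ r', r = r' + 1 := ⟨r - 1, by omega⟩
    simp [chunksFrom_nil]
  | cons w ws ih =>
    intro r out h1 h8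
    obtain ⟨r', rfl⟩ : ∃ r', r = r' + 1 := ⟨r - 1, by omega⟩
    rw [List.foldl_cons, chunksFrom_cons]
    by_cases hr : r' = 0
    · subst hr
      rw [if_pos (by norm_num)]
      have h := ih 8 (out ++ [w] ++ ["\n"]) (by omega) (by omega)
      norm_num at h ⊢
      rw [h]
      simp [chunksFrom_zero]
    · rw [if_neg (by push_cast; omega)]
      have h := ih r' (out ++ [w]) (by omega) (by omega)
      rw [show (8 : Int) - ((r' + 1 : Nat) : Int) + 1 = 8 - ((r' : Nat) : Int) by push_cast; ring]
      norm_num at h ⊢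
      rw [h]

lemma pyRange8_nil (a b : Int) (h : b ≤ a) : PySem.List.pyRange a b 8 = [] := by
  rw [PySem.List.pyRange_of_pos a b (by norm_num)]
  simp [show ¬ a < b by omega]

lemma pyRange8_cons (a b : Int) (h : a < b) :
    PySem.List.pyRange a b 8 = a :: PySem.List.pyRange (a + 8) b 8 := by
  rw [PySem.List.pyRange_of_pos a b (by norm_num),
      PySem.List.pyRange_of_pos (a + 8) b (by norm_num)]
  by_cases h8 : a + 8 < b
  · have hc : ((b - a + 8 - 1) / 8).toNat = ((b - (a + 8) + 8 - 1) / 8).toNat + 1 := by omega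
    rw [if_pos h, if_pos h8, hc, List.range_succ_eq_map, List.map_cons, List.map_map]
    congr 1
    · simp
    · apply List.map_congr_left; intro k _; simp [Function.comp]; ring
  · have hc : ((b - a + 8 - 1) / 8).toNat = 1 := by omega
    rw [if_pos h, if_neg h8, hc]
    simp

lemma chunksFrom_take_drop (zs : List String) : ∀ (r : Nat), 1 ≤ r → zs ≠ [] →
    chunksFrom r zs
      = zs.take r ++ (if r ≤ zs.length then "\n" :: chunksFrom 8 (zs.drop r) else []) := by
  induction zs with
  | nil => intro r _ h; exact absurd rfl h
  | cons w ws ih =>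
    intro r h1 _
    obtain ⟨r', rfl⟩ : ∃ r', r = r' + 1 := ⟨r - 1, by omega⟩
    rw [chunksFrom_cons]
    by_cases hr : r' = 0
    · subst hr
      simp [chunksFrom_zero]
    · obtain ⟨r'', rfl⟩ : ∃ r'', r' = r'' + 1 := ⟨r' - 1, by omega⟩
      cases ws with
      | nil =>
        rw [chunksFrom_nil, if_neg (by simp)]
        simp
      | cons w2 ws2 =>
        rw [ih (r'' + 1) (by omega) (by simp)]
        simp only [List.take_succ_cons, List.length_cons, List.drop_succ_cons, List.cons_append]
        by_cases hc : r'' + 1 ≤ ws2.length + 1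
        · rw [if_pos hc, if_pos (by omega)]
        · rw [if_neg hc, if_neg (by omega)]

lemma foldB_eq (ws : List String) : ∀ (m k : Nat) (out : List String), ws.length - k ≤ m →
    ((PySem.List.pyRange (k : Int) (ws.length : Int) 8).foldl
      (fun out i =>
        (out ++ PySem.List.slice ws (some i) (some (i + 8)))
          ++ (if (((PySem.List.slice ws (some i) (some (i + 8))).length : Nat) : Int) = 8
              then ["\n"] else []))
      out) = out ++ chunksFrom 8 (ws.drop k) := by
  intro m
  induction m with
  | zero =>
    intro k out hm
    rw [pyRange8_nil _ _ (by exact_mod_cast show ws.length ≤ k by omega)]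
    simp [List.drop_eq_nil_of_le (show ws.length ≤ k by omega), chunksFrom_nil]
  | succ m ih =>
    intro k out hm
    by_cases hk : ws.length ≤ k
    · rw [pyRange8_nil _ _ (by exact_mod_cast hk)]
      simp [List.drop_eq_nil_of_le hk, chunksFrom_nil]
    · push_cast at hk
      rw [pyRange8_cons _ _ (by exact_mod_cast show k < ws.length by omega), List.foldl_cons]
      rw [show ((k : Int) + 8) = ((k : Int) + ((8 : Nat) : Int)) by norm_num,
          PySem.List.slice_natCast_add,
          show ((k : Int) + ((8 : Nat) : Int)) = (((k + 8 : Nat) : Int)) by push_cast; ring,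
          ih (k + 8) _ (by omega)]
      rw [chunksFrom_take_drop (ws.drop k) 8 (by omega)
            (by apply List.ne_nil_of_length_pos; rw [List.length_drop]; omega)]
      have hlen : ((((ws.drop k).take 8).length : Nat) : Int) = 8 ↔ 8 ≤ (ws.drop k).length := by
        rw [List.length_take]; omega
      by_cases hc : 8 ≤ (ws.drop k).length
      · rw [if_pos (hlen.mpr hc), if_pos hc]
        simp [List.drop_drop]
      · rw [if_neg (fun h => hc (hlen.mp h)), if_neg hc,
            List.drop_eq_nil_of_le (show ws.length ≤ k + 8 by
              have := List.length_drop (l := ws) (i := k); omega),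
            show (8 : Nat) = 7 + 1 from rfl, chunksFrom_nil]
        simp

-- ===== VERDICT (by name: the statement is the Claim_ definition above) =====
theorem slice_label___py_spec : Claim_equal_slice_label___py := by
  intro label _
  have hA := foldA_eq ((PySem.Str.split? (PySem.Str.replace label ":" " ") " ").getD [])
      8 [] (by omega) (by omega)
  have hB := foldB_eq ((PySem.Str.split? (PySem.Str.replace label ":" " ") " ").getD [])
      ((PySem.Str.split? (PySem.Str.replace label ":" " ") " ").getD []).length 0 [] (by omega)
  exact congrArg (PySem.Str.join " ") (hA.trans hB.symm)
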